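-- pv_equiv track=rewrite | github.com/HARRIBO81/CCC-Soultions | CCC 2006/J3.py | time2
-- ===== SOURCE A (Python) =====
-- def time2(string):
--     counter = 0
--     for i in range(len(string)-1):
--         c = string[i]
--         d = string[i+1]
--         if (c == "a" or c == "b" or c == "c") and (d == "a" or d == "b" or d == "c"):
--             counter+=2
--         elif (c=="d" or c=="e" or c =="f") and (d=="d" or d=="e" or d=="f"):
--             counter += 2
--         elif (c=="g"or c=="h" or c=="i") and (d=="g"or d=="h" or d=="i"):
--             counter += 2
--         elif (c=="j"or c=="k" or c=="l") and (d=="j"or d=="k" or d=="l"):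
--             counter+=2
--         elif (c=="m"or c=="n" or c=="o") and (d=="m"or d=="n" or d=="o"):
--             counter +=2
--         elif (c=="p"or c=="q" or c=="r" or c=="s") and (d=="p"or d=="q" or d=="r" or d=="s"):
--             counter+=2
--         elif (c=="t"or c=="u" or c=="v") and (d=="t"or d=="u" or d=="v"):
--             counter+=2
--         elif (c=="w"or c=="x" or c=="y" or c=="z") and (d=="w"or d=="x" or d=="y" or d == "z"):
--             counter+=2
--     return counter
-- ===== SOURCE B (Python) =====
-- from itertools import groupby
--
-- _GROUPS = ["abc", "def", "ghi", "jkl", "mno", "pqrs", "tuv", "wxyz"]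
--
-- def group_of(ch):
--     for idx, letters in enumerate(_GROUPS):
--         if ch in letters:
--             return idx
--     return None
--
-- def time2(string):
--     total = 0
--     for key, run in groupby(string, key=group_of):
--         if key is not None:
--             total += 2 * (sum(1 for _ in run) - 1)
--     return total
-- ===== Notes on version B (the rewrite author's own statement) =====
-- stated objective: idiomatic
-- what changed: Replaced the 8-branch adjacent-pair if/elif chain with a group_of(ch) keypad lookup and itertools.groupby run-length scan that adds 2*(run-1) per same-group run.
import Mathlib
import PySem

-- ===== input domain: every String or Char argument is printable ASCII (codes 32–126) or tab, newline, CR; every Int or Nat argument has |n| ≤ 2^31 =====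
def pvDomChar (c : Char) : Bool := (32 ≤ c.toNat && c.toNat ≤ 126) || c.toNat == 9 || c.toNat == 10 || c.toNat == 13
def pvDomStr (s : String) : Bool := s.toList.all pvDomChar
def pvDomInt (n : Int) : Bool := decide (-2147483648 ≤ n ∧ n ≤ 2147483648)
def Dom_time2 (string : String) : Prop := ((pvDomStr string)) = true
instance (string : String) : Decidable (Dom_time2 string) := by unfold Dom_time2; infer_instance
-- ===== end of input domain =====

-- B replaces A's adjacent-pair 8-branch if/elif chain by a keypad-group lookup plus an
-- itertools.groupby run scan adding 2*(run length - 1) per letter run (idiomatic decomposition, same cost).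

-- ===== PORT A =====
def time2 (string : String) : Int :=
  (PySem.List.pyRange 0 (PySem.Str.len string - 1) 1).foldl
    (fun counter i =>
      let c := PySem.List.pyGetD string.toList i ' '
      let d := PySem.List.pyGetD string.toList (i + 1) ' '
      if (c == 'a' || c == 'b' || c == 'c') && (d == 'a' || d == 'b' || d == 'c') then counter + 2
      else if (c == 'd' || c == 'e' || c == 'f') && (d == 'd' || d == 'e' || d == 'f') then counter + 2
      else if (c == 'g' || c == 'h' || c == 'i') && (d == 'g' || d == 'h' || d == 'i') then counter + 2
      else if (c == 'j' || c == 'k' || c == 'l') && (d == 'j' || d == 'k' || d == 'l') then counter + 2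
      else if (c == 'm' || c == 'n' || c == 'o') && (d == 'm' || d == 'n' || d == 'o') then counter + 2
      else if (c == 'p' || c == 'q' || c == 'r' || c == 's') && (d == 'p' || d == 'q' || d == 'r' || d == 's') then counter + 2
      else if (c == 't' || c == 'u' || c == 'v') && (d == 't' || d == 'u' || d == 'v') then counter + 2
      else if (c == 'w' || c == 'x' || c == 'y' || c == 'z') && (d == 'w' || d == 'x' || d == 'y' || d == 'z') then counter + 2
      else counter) 0

-- ===== PORT B =====
def pvGroups : List String := ["abc", "def", "ghi", "jkl", "mno", "pqrs", "tuv", "wxyz"]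

-- 'for idx, letters in enumerate(_GROUPS): if ch in letters: return idx' — the early return
-- becomes structural recursion; 'ch in letters' for the single char ch drawn from the string
-- is exactly membership among the group string's characters.
def groupOfLoop (ch : Char) : List (Int × String) → Option Int
  | [] => none
  | (idx, letters) :: rest =>
    if letters.toList.contains ch then some idx else groupOfLoop ch rest

def group_of (ch : Char) : Option Int :=
  groupOfLoop ch (PySem.List.enumerate pvGroups 0)

-- itertools.groupby(string, key=group_of): each step takes the maximal run sharing the head's
-- key, adds 2*(run length - 1) when the key is not None, and recurses on the remainder.
def time2AltGo : List Char → Int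
  | [] => 0
  | c :: rest =>
    let k := group_of c
    let run := rest.takeWhile (fun d => group_of d == k)
    let rest' := rest.dropWhile (fun d => group_of d == k)
    (match k with
     | some _ => 2 * ((1 + (run.length : Int)) - 1)
     | none => 0) + time2AltGo rest'
  termination_by l => l.length
  decreasing_by
    simp only [List.length_cons]
    exact Nat.lt_succ_of_le (List.length_dropWhile_le _ _)

def time2_alt (string : String) : Int := time2AltGo string.toList

-- ===== PRECONDITION & SPEC =====
def Spec_time2 (string : String) (out : Int) : Prop := out = time2_alt string
instance (string : String) (out : Int) : Decidable (Spec_time2 string out) := by unfold Spec_time2; infer_instance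

-- ===== CLAIM (what is proved, stated in full; the proofs are below) =====
def Claim_equal_time2 : Prop := ∀ (string : String), Dom_time2 string → Spec_time2 string (time2 string)

-- ===== LEMMAS AND PROOFS =====

-- weight of one adjacent pair: 2 iff both chars lie in the same keypad group
def pairW (c d : Char) : Int :=
  if (group_of c).isSome && (group_of c == group_of d) then 2 else 0

-- sum of pairW over all adjacent pairs
def pairSum : List Char → Int
  | [] => 0
  | [_] => 0
  | c :: d :: t => pairW c d + pairSum (d :: t)

lemma group_of_eq (ch : Char) :
    group_of ch =
      (if ['a','b','c'].contains ch then some 0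
       else if ['d','e','f'].contains ch then some 1
       else if ['g','h','i'].contains ch then some 2
       else if ['j','k','l'].contains ch then some 3
       else if ['m','n','o'].contains ch then some 4
       else if ['p','q','r','s'].contains ch then some 5
       else if ['t','u','v'].contains ch then some 6
       else if ['w','x','y','z'].contains ch then some 7
       else none) := by rfl

lemma cond0 (c : Char) : (c == 'a' || c == 'b' || c == 'c') = (group_of c == some 0) := by
  by_cases h : c = 'a' ∨ c = 'b' ∨ c = 'c'
  · rcases h with h|h|h <;> subst h <;> decide
  · rw [group_of_eq]; split_ifs with h1 <;> simp_all

lemma cond1 (c : Char) : (c == 'd' || c == 'e' || c == 'f') = (group_of c == some 1) := by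
  by_cases h : c = 'd' ∨ c = 'e' ∨ c = 'f'
  · rcases h with h|h|h <;> subst h <;> decide
  · rw [group_of_eq]; split_ifs with h1 <;> simp_all

lemma cond2 (c : Char) : (c == 'g' || c == 'h' || c == 'i') = (group_of c == some 2) := by
  by_cases h : c = 'g' ∨ c = 'h' ∨ c = 'i'
  · rcases h with h|h|h <;> subst h <;> decide
  · rw [group_of_eq]; split_ifs with h1 <;> simp_all

lemma cond3 (c : Char) : (c == 'j' || c == 'k' || c == 'l') = (group_of c == some 3) := by
  by_cases h : c = 'j' ∨ c = 'k' ∨ c = 'l'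
  · rcases h with h|h|h <;> subst h <;> decide
  · rw [group_of_eq]; split_ifs with h1 <;> simp_all

lemma cond4 (c : Char) : (c == 'm' || c == 'n' || c == 'o') = (group_of c == some 4) := by
  by_cases h : c = 'm' ∨ c = 'n' ∨ c = 'o'
  · rcases h with h|h|h <;> subst h <;> decide
  · rw [group_of_eq]; split_ifs with h1 <;> simp_all

lemma cond5 (c : Char) : (c == 'p' || c == 'q' || c == 'r' || c == 's') = (group_of c == some 5) := by
  by_cases h : c = 'p' ∨ c = 'q' ∨ c = 'r' ∨ c = 's'
  · rcases h with h|h|h|h <;> subst h <;> decide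
  · rw [group_of_eq]; split_ifs with h1 <;> simp_all

lemma cond6 (c : Char) : (c == 't' || c == 'u' || c == 'v') = (group_of c == some 6) := by
  by_cases h : c = 't' ∨ c = 'u' ∨ c = 'v'
  · rcases h with h|h|h <;> subst h <;> decide
  · rw [group_of_eq]; split_ifs with h1 <;> simp_all

lemma cond7 (c : Char) : (c == 'w' || c == 'x' || c == 'y' || c == 'z') = (group_of c == some 7) := by
  by_cases h : c = 'w' ∨ c = 'x' ∨ c = 'y' ∨ c = 'z'
  · rcases h with h|h|h|h <;> subst h <;> decide
  · rw [group_of_eq]; split_ifs with h1 <;> simp_all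

lemma group_of_mem (c : Char) :
    group_of c ∈ ([none, some 0, some 1, some 2, some 3, some 4, some 5, some 6, some 7] : List (Option Int)) := by
  rw [group_of_eq]; split_ifs <;> simp

lemma bodyA_eq (counter : Int) (c d : Char) :
    (if (c == 'a' || c == 'b' || c == 'c') && (d == 'a' || d == 'b' || d == 'c') then counter + 2
      else if (c == 'd' || c == 'e' || c == 'f') && (d == 'd' || d == 'e' || d == 'f') then counter + 2
      else if (c == 'g' || c == 'h' || c == 'i') && (d == 'g' || d == 'h' || d == 'i') then counter + 2
      else if (c == 'j' || c == 'k' || c == 'l') && (d == 'j' || d == 'k' || d == 'l') then counter + 2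
      else if (c == 'm' || c == 'n' || c == 'o') && (d == 'm' || d == 'n' || d == 'o') then counter + 2
      else if (c == 'p' || c == 'q' || c == 'r' || c == 's') && (d == 'p' || d == 'q' || d == 'r' || d == 's') then counter + 2
      else if (c == 't' || c == 'u' || c == 'v') && (d == 't' || d == 'u' || d == 'v') then counter + 2
      else if (c == 'w' || c == 'x' || c == 'y' || c == 'z') && (d == 'w' || d == 'x' || d == 'y' || d == 'z') then counter + 2
      else counter) = counter + pairW c d := by
  have hc := group_of_mem c
  have hd := group_of_mem d
  simp only [cond0, cond1, cond2, cond3, cond4, cond5, cond6, cond7, pairW]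
  generalize group_of c = oc at *
  generalize group_of d = od at *
  fin_cases hc <;> fin_cases hd <;> simp

lemma rangeSum (cs : List Char) :
    ((List.range (cs.length - 1)).map
      (fun k => pairW (cs.getD k ' ') (cs.getD (k + 1) ' '))).sum = pairSum cs := by
  induction cs with
  | nil => simp [pairSum]
  | cons c rest ih =>
    cases rest with
    | nil => simp [pairSum]
    | cons d t =>
      have h : (c :: d :: t : List Char).length - 1 = (d :: t : List Char).length - 1 + 1 := by
        simp
      rw [h, List.range_succ_eq_map, List.map_cons, List.map_map, List.sum_cons,
        show pairSum (c :: d :: t) = pairW c d + pairSum (d :: t) from rfl]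
      have e0 : pairW ((c :: d :: t).getD 0 ' ') ((c :: d :: t).getD (0 + 1) ' ') = pairW c d := by
        simp [List.getD]
      rw [e0]
      congr 1

lemma runStep (c : Char) (rest : List Char) :
    pairSum (c :: rest) =
      (if (group_of c).isSome then
        2 * ((rest.takeWhile (fun d => group_of d == group_of c)).length : Int)
       else 0) +
      pairSum (rest.dropWhile (fun d => group_of d == group_of c)) := by
  induction rest generalizing c with
  | nil => simp [pairSum]
  | cons d t ih =>
    by_cases hd : group_of d = group_of c
    · have hp : (group_of d == group_of c) = true := by simp [hd]
      rw [List.takeWhile_cons, List.dropWhile_cons]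
      simp only [hp, if_true]
      have hfun : (fun e => group_of e == group_of d) = (fun e => group_of e == group_of c) := by
        funext e; rw [hd]
      have hrec := ih d
      rw [hfun] at hrec
      show pairW c d + pairSum (d :: t) = _
      rw [hrec, pairW]
      have hcd : (group_of c == group_of d) = true := by simp [hd]
      cases hs : (group_of c).isSome with
      | true =>
        have hds : (group_of d).isSome = true := by rw [hd]; exact hs
        simp only [hcd, Bool.and_true, hds, List.length_cons, if_true]
        push_cast
        ring
      | false =>
        have hds : (group_of d).isSome = false := by rw [hd]; exact hs
        simp only [hcd, Bool.and_true, hds, Bool.false_eq_true, if_false]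
        ring
    · have hp : (group_of d == group_of c) = false := by simp [hd]
      rw [List.takeWhile_cons, List.dropWhile_cons]
      simp only [hp, Bool.false_eq_true, if_false]
      show pairW c d + pairSum (d :: t) = _
      have hw : pairW c d = 0 := by
        rw [pairW]
        have hne : (group_of c == group_of d) = false := by
          simp only [beq_eq_false_iff_ne, ne_eq]
          intro h; exact hd h.symm
        simp [hne]
      simp [hw]

lemma go_eq_pairSum_aux : ∀ (n : ℕ) (cs : List Char), cs.length ≤ n → time2AltGo cs = pairSum cs := by
  intro n
  induction n with
  | zero =>
    intro cs h
    have : cs = [] := List.eq_nil_of_length_eq_zero (Nat.le_zero.mp h)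
    subst this
    rw [time2AltGo]; rfl
  | succ n ih =>
    intro cs h
    cases cs with
    | nil => rw [time2AltGo]; rfl
    | cons c rest =>
      rw [time2AltGo]
      have hlen : (rest.dropWhile (fun d => group_of d == group_of c)).length ≤ n := by
        have := List.length_dropWhile_le (fun d => group_of d == group_of c) rest
        simp only [List.length_cons] at h
        omega
      rw [ih _ hlen, runStep c rest]
      cases hk : group_of c with
      | none => simp
      | some g => simp only [Option.isSome_some, if_true]; ring_nf

lemma time2_eq_pairSum (s : String) : time2 s = pairSum s.toList := by
  unfold time2
  rw [PySem.List.pyRange_one]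
  have hlen : (PySem.Str.len s - 1 - 0).toNat = s.toList.length - 1 := by
    simp [PySem.Str.len]
  rw [hlen, List.foldl_map]
  refine Eq.trans (PySem.List.foldl_congr_mem
    (g := fun (acc : Int) (k : ℕ) =>
      acc + pairW (s.toList.getD k ' ') (s.toList.getD (k + 1) ' ')) _ _ _ ?_) ?_
  · intro acc k _
    have h1 : PySem.List.pyGetD s.toList (0 + (k : Int)) ' ' = s.toList.getD k ' ' := by
      rw [zero_add]; exact PySem.List.pyGetD_natCast s.toList k ' '
    have h2 : PySem.List.pyGetD (s.toList) (0 + (k : Int) + 1) ' ' = s.toList.getD (k + 1) ' ' := by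
      have e : (0 + (k : Int) + 1) = ((k + 1 : ℕ) : Int) := by push_cast; ring
      rw [e]; exact PySem.List.pyGetD_natCast s.toList (k + 1) ' '
    simp only [h1, h2]
    exact bodyA_eq acc _ _
  · rw [PySem.List.foldl_add, rangeSum, zero_add]

-- ===== VERDICT (by name: the statement is the Claim_ definition above) =====
theorem time2_spec : Claim_equal_time2 := by
  intro s _
  unfold Spec_time2 time2_alt
  rw [time2_eq_pairSum, go_eq_pairSum_aux s.toList.length s.toList le_rfl]
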